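-- pv_equiv track=rewrite | github.com/MohaKhalili/MyPy_TinyCodes | 13 - Week 7/Multidimentional lists/Maximum_Even_Value_of_2D_List/Maximum_Even_Value_of_2D_List.py | Maximum_Even_Value_of_2D_List
-- ===== SOURCE A (Python) =====
-- def Maximum_Even_Value_of_2D_List(my_list):
--     total = 0
--     even_list = []
--     for dim1 in my_list:
--         for index in range(len(dim1)):
--             test_number = dim1[index]%2
--             if test_number == 0:
--                 even_list.append(dim1[index])
--     if len(even_list) > 0:
--         max_even = even_list[0]
--         for i in range(1,len(even_list)):
--             if max_even <= even_list[i]: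
--                 max_even = even_list[i]
--         result = max_even
--     else:
--         result = None
--     return result
-- ===== SOURCE B (Python) =====
-- def Maximum_Even_Value_of_2D_List(my_list):
--     result = None
--     for row in my_list:
--         for x in row:
--             if x % 2 == 0:
--                 if result is None or x >= result:
--                     result = x
--     return result
-- ===== Notes on version B (the rewrite author's own statement) =====
-- stated objective: simpler
-- what changed: Replaces the collect-evens-into-a-list then separate index-based max scan with a single streaming pass keeping a running Optional maximum.
import Mathlib
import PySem

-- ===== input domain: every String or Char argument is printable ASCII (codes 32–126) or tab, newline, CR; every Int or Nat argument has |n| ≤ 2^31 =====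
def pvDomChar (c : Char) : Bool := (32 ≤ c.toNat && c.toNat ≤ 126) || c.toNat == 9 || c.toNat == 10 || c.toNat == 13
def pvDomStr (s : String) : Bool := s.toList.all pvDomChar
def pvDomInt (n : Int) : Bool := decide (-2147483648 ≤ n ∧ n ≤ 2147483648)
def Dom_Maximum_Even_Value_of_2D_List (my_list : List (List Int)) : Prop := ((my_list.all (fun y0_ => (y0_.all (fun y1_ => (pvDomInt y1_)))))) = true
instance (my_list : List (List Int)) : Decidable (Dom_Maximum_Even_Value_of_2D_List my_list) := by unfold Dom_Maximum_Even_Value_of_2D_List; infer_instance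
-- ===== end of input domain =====

-- B replaces A's collect-then-scan (build even_list, then an index loop finding its max)
-- by one streaming pass maintaining an Option Int running maximum; same result, simpler.

-- ===== PORT A =====
def Maximum_Even_Value_of_2D_List (my_list : List (List Int)) : Option Int :=
  let even_list : List Int := my_list.foldl (fun el dim1 =>
    (PySem.List.pyRange 0 (dim1.length : Int) 1).foldl (fun el index =>
      let test_number := PySem.Int.mod (PySem.List.pyGetD dim1 index 0) 2
      if test_number == 0 then el ++ [PySem.List.pyGetD dim1 index 0] else el) el) []
  if even_list.length > 0 then
    let max_even := PySem.List.pyGetD even_list 0 0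
    let max_even := (PySem.List.pyRange 1 (even_list.length : Int) 1).foldl (fun max_even i =>
      if max_even ≤ PySem.List.pyGetD even_list i 0 then PySem.List.pyGetD even_list i 0 else max_even) max_even
    some max_even
  else none

-- ===== PORT B =====
def Maximum_Even_Value_of_2D_List_alt (my_list : List (List Int)) : Option Int :=
  my_list.foldl (fun result row =>
    row.foldl (fun result x =>
      if PySem.Int.mod x 2 == 0 then
        match result with
        | none => some x
        | some m => if m ≤ x then some x else some m
      else result) result) none

-- ===== PRECONDITION & SPEC =====
def Spec_Maximum_Even_Value_of_2D_List (my_list : List (List Int)) (out : Option Int) : Prop := out = Maximum_Even_Value_of_2D_List_alt my_list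
instance (my_list : List (List Int)) (out : Option Int) : Decidable (Spec_Maximum_Even_Value_of_2D_List my_list out) := by unfold Spec_Maximum_Even_Value_of_2D_List; infer_instance

-- ===== CLAIM (what is proved, stated in full; the proofs are below) =====
def Claim_equal_Maximum_Even_Value_of_2D_List : Prop := ∀ (my_list : List (List Int)), Dom_Maximum_Even_Value_of_2D_List my_list → Spec_Maximum_Even_Value_of_2D_List my_list (Maximum_Even_Value_of_2D_List my_list)

-- ===== LEMMAS AND PROOFS =====

-- the even test as a Bool predicate
def pvEven (x : Int) : Bool := PySem.Int.mod x 2 == 0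

-- B's streaming step on an even element
def pvStep (r : Option Int) (x : Int) : Option Int :=
  match r with
  | none => some x
  | some m => if m ≤ x then some x else some m

-- A's inner index loop collects the row's even elements (stated zeta-reduced)
theorem a_inner_fold (dim1 : List Int) (el : List Int) :
    (PySem.List.pyRange 0 (dim1.length : Int) 1).foldl (fun el index =>
      if PySem.Int.mod (PySem.List.pyGetD dim1 index 0) 2 == 0
      then el ++ [PySem.List.pyGetD dim1 index 0] else el) el
    = el ++ dim1.filter pvEven :=
  (PySem.List.foldl_pyRange_zero_pyGetD' dim1 0
      (fun el x => if PySem.Int.mod x 2 == 0 then el ++ [x] else el) el).trans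
    (PySem.List.foldl_append_if_eq_filter pvEven dim1 el)

-- accumulating the filters of the rows = filter of the flatten
theorem collect_simp (my_list : List (List Int)) (el : List Int) :
    my_list.foldl (fun el dim1 => el ++ dim1.filter pvEven) el
    = el ++ my_list.flatten.filter pvEven := by
  induction my_list generalizing el with
  | nil => simp
  | cons row rest ih => simp [List.foldl_cons, ih, List.filter_append]

-- B's inner loop = pvStep folded over the row's even elements
theorem b_row (row : List Int) (r : Option Int) :
    row.foldl (fun result x =>
      if PySem.Int.mod x 2 == 0 then
        match result with
        | none => some x
        | some m => if m ≤ x then some x else some m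
      else result) r
    = (row.filter pvEven).foldl pvStep r := by
  induction row generalizing r with
  | nil => rfl
  | cons x xs ihx =>
      simp only [List.foldl_cons, List.filter_cons]
      cases h : PySem.Int.mod x 2 == 0 with
      | false =>
          have hp : pvEven x = false := h
          rw [if_neg (by simp), hp]
          exact ihx r
      | true =>
          have hp : pvEven x = true := h
          rw [if_pos (by simp), hp]
          exact (ihx (pvStep r x)).trans rfl

-- B's outer loop over rows = pvStep folded over the filtered flatten
theorem b_outer (my_list : List (List Int)) (r : Option Int) :
    my_list.foldl (fun r row => (row.filter pvEven).foldl pvStep r) r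
    = (my_list.flatten.filter pvEven).foldl pvStep r := by
  induction my_list generalizing r with
  | nil => rfl
  | cons row rest ih =>
      simp [List.foldl_cons, ih, List.filter_append, List.foldl_append]

-- fold of pvStep over a nonempty list is `some` of the plain max scan
theorem pvStep_fold_cons (e : Int) (rest : List Int) :
    (e :: rest).foldl pvStep none
    = some (rest.foldl (fun m x => if m ≤ x then x else m) e) := by
  simp only [List.foldl_cons, pvStep]
  induction rest generalizing e with
  | nil => rfl
  | cons x xs ih =>
      simp only [List.foldl_cons, pvStep]
      by_cases h : e ≤ x <;> simp [h, ih]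

-- A's max-scan loop over indices 1..len equals the fold over the tail
theorem a_scan (E : List Int) :
    (PySem.List.pyRange 1 (E.length : Int) 1).foldl (fun m i =>
      if m ≤ PySem.List.pyGetD E i 0 then PySem.List.pyGetD E i 0 else m)
      (PySem.List.pyGetD E 0 0)
    = (E.drop 1).foldl (fun m x => if m ≤ x then x else m) (PySem.List.pyGetD E 0 0) :=
  PySem.List.foldl_pyRange_pyGetD' E 0 (fun m x => if m ≤ x then x else m)
    (PySem.List.pyGetD E 0 0) (by norm_num)

-- ===== VERDICT (by name: the statement is the Claim_ definition above) =====
theorem Maximum_Even_Value_of_2D_List_spec : Claim_equal_Maximum_Even_Value_of_2D_List := by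
  intro my_list _
  unfold Spec_Maximum_Even_Value_of_2D_List
  unfold Maximum_Even_Value_of_2D_List Maximum_Even_Value_of_2D_List_alt
  simp only [a_inner_fold, b_row]
  rw [collect_simp, b_outer]
  simp only [List.nil_append]
  cases hE : my_list.flatten.filter pvEven with
  | nil => simp
  | cons e rest =>
      rw [pvStep_fold_cons, if_pos (by simp), a_scan]
      have h0 : PySem.List.pyGetD (e :: rest) 0 0 = e := by
        simp [PySem.List.pyGetD, PySem.List.pyIdx?, PySem.List.pyGet?]
      rw [h0]
      simp
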